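-- pv_equiv track=rewrite | github.com/StijnMatsHendriks/advent_of_code | 04/04.py | barcode_to_data
-- ===== SOURCE A (Python) =====
-- def barcode_to_data(barcode, mode):
--     if mode == "row":
--         barcode = barcode[:7]
--         num = list(range(128))
--     if mode == "col":
--         barcode = barcode[7:]
--         num = list(range(8))
--
--     for char in barcode:
--         grens = int(len(num) / 2)
--
--         if not char:
--             num = num[grens:]
--
--         num = num[:grens]
--     return(num)
-- ===== SOURCE B (Python) =====
-- def barcode_to_data(barcode, mode):
--     if mode == "row":
--         chars, lo, size = barcode[:7], 0, 128
--     elif mode == "col":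
--         chars, lo, size = barcode[7:], 0, 8
--     for char in chars:
--         size //= 2
--         if not char:
--             lo += size
--     return list(range(lo, lo + size))
-- ===== Notes on version B (the rewrite author's own statement) =====
-- stated objective: simpler
-- what changed: B replaces A's materialized candidate list and repeated list slicing with two integers (lo, size) tracking the interval, building the output range only once at the end.
import Mathlib
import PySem

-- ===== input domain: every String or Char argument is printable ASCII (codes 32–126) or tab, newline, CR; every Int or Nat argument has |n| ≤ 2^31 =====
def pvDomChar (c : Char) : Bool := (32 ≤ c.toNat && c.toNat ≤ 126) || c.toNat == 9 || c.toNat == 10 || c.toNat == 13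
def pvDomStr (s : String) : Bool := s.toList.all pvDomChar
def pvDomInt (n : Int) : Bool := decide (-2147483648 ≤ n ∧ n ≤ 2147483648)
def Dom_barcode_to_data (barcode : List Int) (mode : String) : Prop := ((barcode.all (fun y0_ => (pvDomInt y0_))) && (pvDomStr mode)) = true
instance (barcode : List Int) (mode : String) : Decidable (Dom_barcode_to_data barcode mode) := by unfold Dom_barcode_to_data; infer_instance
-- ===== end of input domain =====

-- B replaces the materialized candidate list and repeated slicing by two integers (lo, size)
-- tracking the interval, built into a range only at the end (objective: simpler).

-- ===== PORT A =====
-- For an invalid mode Python A raises NameError ('num' unbound); that case is excluded by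
-- Pre_ below, and the port returns the fold over the untouched barcode starting from [].
def barcode_to_data (barcode : List Int) (mode : String) : List Int :=
  let bn : List Int × List Int :=
    if mode == "row" then (PySem.List.slice barcode none (some 7), PySem.List.pyRange 0 128 1)
    else (barcode, [])
  let bn : List Int × List Int :=
    if mode == "col" then (PySem.List.slice bn.1 (some 7) none, PySem.List.pyRange 0 8 1)
    else bn
  bn.1.foldl (fun num char =>
    let grens : Int := ((num.length : Int)) / 2   -- int(len(num)/2): len ≥ 0, so exact
    let num := if char == 0 then PySem.List.slice num (some grens) none else num
    PySem.List.slice num none (some grens)) bn.2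

-- ===== PORT B =====
def barcode_to_data_alt (barcode : List Int) (mode : String) : List Int :=
  let cls : List Int × Int × Int :=
    if mode == "row" then (PySem.List.slice barcode none (some 7), 0, 128)
    else if mode == "col" then (PySem.List.slice barcode (some 7) none, 0, 8)
    else (barcode, 0, 0)   -- invalid mode: Python B raises NameError; excluded by Pre_
  let ls : Int × Int := cls.1.foldl (fun (p : Int × Int) char =>
    let size := PySem.Int.floordiv p.2 2
    let lo := if char == 0 then p.1 + size else p.1
    (lo, size)) (cls.2.1, cls.2.2)
  PySem.List.pyRange ls.1 (ls.1 + ls.2) 1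

-- ===== PRECONDITION & SPEC =====
-- Pre_ excludes only modes other than "row"/"col", on which both Pythons raise NameError.
def Pre_barcode_to_data (barcode : List Int) (mode : String) : Prop :=
  mode = "row" ∨ mode = "col"
instance (barcode : List Int) (mode : String) : Decidable (Pre_barcode_to_data barcode mode) := by unfold Pre_barcode_to_data; infer_instance

def pvWitness_barcode_to_data : List Int × String := ([1, 0, 1, 0, 1, 0, 1, 0, 0, 1], "row")

def Spec_barcode_to_data (barcode : List Int) (mode : String) (out : List Int) : Prop := out = barcode_to_data_alt barcode mode
instance (barcode : List Int) (mode : String) (out : List Int) : Decidable (Spec_barcode_to_data barcode mode out) := by unfold Spec_barcode_to_data; infer_instance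

-- ===== CLAIM (what is proved, stated in full; the proofs are below) =====
def Claim_equal_barcode_to_data : Prop := ∀ (barcode : List Int) (mode : String), Dom_barcode_to_data barcode mode → Pre_barcode_to_data barcode mode → Spec_barcode_to_data barcode mode (barcode_to_data barcode mode)

-- ===== LEMMAS AND PROOFS =====

-- take / drop of a unit-step range, on the in-bounds shapes the loop produces
lemma take_pyRange (lo g size : Int) (hg : 0 ≤ g) (hgs : g ≤ size) :
    (PySem.List.pyRange lo (lo + size) 1).take g.toNat = PySem.List.pyRange lo (lo + g) 1 := by
  have hsplit := PySem.List.pyRange_one_append lo (lo + g) (lo + size) (by omega) (by omega)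
  have hlen : (PySem.List.pyRange lo (lo + g) 1).length = g.toNat := by
    rw [PySem.List.length_pyRange_one]; omega
  rw [hsplit, ← hlen, List.take_left]

lemma drop_pyRange (lo g size : Int) (hg : 0 ≤ g) (hgs : g ≤ size) :
    (PySem.List.pyRange lo (lo + size) 1).drop g.toNat = PySem.List.pyRange (lo + g) (lo + size) 1 := by
  have hsplit := PySem.List.pyRange_one_append lo (lo + g) (lo + size) (by omega) (by omega)
  have hlen : (PySem.List.pyRange lo (lo + g) 1).length = g.toNat := by
    rw [PySem.List.length_pyRange_one]; omega
  rw [hsplit, ← hlen, List.drop_left]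

-- the loop invariant: A's list is always the range [lo, lo+size) tracked by B
lemma loop_eq (chars : List Int) : ∀ (lo size : Int), 0 ≤ size →
    chars.foldl (fun num char =>
      PySem.List.slice (if (char == 0) = true then
          PySem.List.slice num (some ((num.length : Int) / 2)) none else num)
        none (some ((num.length : Int) / 2))) (PySem.List.pyRange lo (lo + size) 1)
    = PySem.List.pyRange
        (chars.foldl (fun (p : Int × Int) char =>
          (if (char == 0) = true then p.1 + PySem.Int.floordiv p.2 2 else p.1,
           PySem.Int.floordiv p.2 2)) (lo, size)).1
        ((chars.foldl (fun (p : Int × Int) char =>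
          (if (char == 0) = true then p.1 + PySem.Int.floordiv p.2 2 else p.1,
           PySem.Int.floordiv p.2 2)) (lo, size)).1 +
         (chars.foldl (fun (p : Int × Int) char =>
          (if (char == 0) = true then p.1 + PySem.Int.floordiv p.2 2 else p.1,
           PySem.Int.floordiv p.2 2)) (lo, size)).2) 1 := by
  induction chars with
  | nil => intro lo size _; rfl
  | cons c cs ih =>
    intro lo size hs
    set g : Int := size / 2 with hgdef
    have hg0 : 0 ≤ g := by positivity
    have hg2 : g + g ≤ size := by
      have := Int.mul_ediv_add_emod size 2
      have := Int.emod_nonneg size (by norm_num : (2:Int) ≠ 0)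
      omega
    have hgs : g ≤ size := by omega
    have hlen : ((PySem.List.pyRange lo (lo + size) 1).length : Int) = size := by
      rw [PySem.List.length_pyRange_one]; omega
    have hfd : PySem.Int.floordiv size 2 = g := by
      rw [PySem.Int.floordiv_eq_ediv_of_pos (by norm_num)]
    have hA : PySem.List.slice (if (c == 0) = true then
          PySem.List.slice (PySem.List.pyRange lo (lo + size) 1)
            (some (((PySem.List.pyRange lo (lo + size) 1).length : Int) / 2)) none
        else PySem.List.pyRange lo (lo + size) 1)
        none (some (((PySem.List.pyRange lo (lo + size) 1).length : Int) / 2))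
      = PySem.List.pyRange (if (c == 0) = true then lo + g else lo)
          ((if (c == 0) = true then lo + g else lo) + g) 1 := by
      rw [hlen, ← hgdef]
      by_cases hc : (c == 0) = true
      · simp only [hc, if_true]
        rw [PySem.List.slice_from _ hg0, drop_pyRange lo g size hg0 hgs,
            PySem.List.slice_to _ hg0]
        have h1 : lo + size = (lo + g) + (size - g) := by ring
        rw [h1, take_pyRange (lo + g) g (size - g) hg0 (by omega)]
      · simp only [hc, Bool.false_eq_true, if_false]
        rw [PySem.List.slice_to _ hg0, take_pyRange lo g size hg0 hgs]
    simp only [List.foldl_cons, hfd, hA]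
    exact ih (if (c == 0) = true then lo + g else lo) g hg0

-- ===== VERDICT (by name: the statement is the Claim_ definition above) =====
theorem barcode_to_data_spec : Claim_equal_barcode_to_data := by
  intro barcode mode _ hPre
  unfold Spec_barcode_to_data barcode_to_data barcode_to_data_alt
  rcases hPre with h | h <;> subst h <;> simp only [beq_self_eq_true, if_true, String.reduceBEq]
  · have := loop_eq (PySem.List.slice barcode none (some 7)) 0 128 (by norm_num)
    simpa using this
  · have := loop_eq (PySem.List.slice barcode (some 7) none) 0 8 (by norm_num)
    simpa using this
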